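-- pv_equiv track=rewrite | github.com/Lagotob/experience-factory-bot | moderation.py | contains_bad_words
-- ===== SOURCE A (Python) =====
-- BAD_WORDS = [
--     # Add your bad words here
--     "fuck", "shit", "asshole",
-- ]
--
-- def contains_bad_words(text: str) -> bool:
--     """Check if text contains any bad words"""
--     if not text:
--         return False
--
--     text_lower = text.lower()
--     for word in BAD_WORDS:
--         if word.lower() in text_lower:
--             return True
--     return False
-- ===== SOURCE B (Python) =====
-- BAD_WORDS = [
--     # Add your bad words here
--     "fuck", "shit", "asshole",
-- ]
--
-- _BAD_TUPLE = tuple(w.lower() for w in BAD_WORDS)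
--
-- def contains_bad_words(text: str) -> bool:
--     """Check if text contains any bad words"""
--     if not text:
--         return False
--     s = text.lower()
--     for i in range(len(s)):
--         if s.startswith(_BAD_TUPLE, i):
--             return True
--     return False
-- ===== Notes on version B (the rewrite author's own statement) =====
-- stated objective: alternative
-- what changed: Instead of scanning the text once per bad word with a substring search, B makes a single left-to-right pass over the lowered text, testing at each suffix whether any bad word is a prefix (one startswith-with-tuple check per position).
import Mathlib
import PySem

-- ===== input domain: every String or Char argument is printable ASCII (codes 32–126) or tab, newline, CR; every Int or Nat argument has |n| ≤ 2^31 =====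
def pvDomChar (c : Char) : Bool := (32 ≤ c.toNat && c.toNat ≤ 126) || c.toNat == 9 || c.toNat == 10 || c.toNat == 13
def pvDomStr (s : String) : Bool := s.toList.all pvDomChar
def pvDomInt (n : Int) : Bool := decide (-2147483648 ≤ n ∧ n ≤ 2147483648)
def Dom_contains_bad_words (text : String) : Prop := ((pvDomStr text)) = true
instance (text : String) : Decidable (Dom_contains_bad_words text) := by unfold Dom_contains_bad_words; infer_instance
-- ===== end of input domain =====

-- B replaces A's per-word substring scans by one positional pass that tests each suffix
-- for a bad-word prefix (alternative traversal, same cost).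
-- ===== PORT A =====
def pvBadWords : List String := ["fuck", "shit", "asshole"]

-- for word in BAD_WORDS: if word.lower() in text_lower: return True  (early-return loop = List.any)
def contains_bad_words (text : String) : Bool :=
  if text == "" then false
  else
    let text_lower := PySem.Str.lower text
    pvBadWords.any (fun word => PySem.Str.isIn (PySem.Str.lower word) text_lower)

-- ===== PORT B =====
-- while s: if s.startswith(_BAD_TUPLE): return True; s = s[1:]
def pvBadScan : List Char → Bool
  | [] => false
  | c :: rest =>
    (pvBadWords.any (fun w => w.toList.isPrefixOf (c :: rest))) || pvBadScan rest

def contains_bad_words_alt (text : String) : Bool :=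
  if text == "" then false
  else pvBadScan (PySem.Str.lower text).toList

-- ===== PRECONDITION & SPEC =====
def Spec_contains_bad_words (text : String) (out : Bool) : Prop := out = contains_bad_words_alt text
instance (text : String) (out : Bool) : Decidable (Spec_contains_bad_words text out) := by unfold Spec_contains_bad_words; infer_instance

-- ===== CLAIM (what is proved, stated in full; the proofs are below) =====
def Claim_equal_contains_bad_words : Prop := ∀ (text : String), Dom_contains_bad_words text → Spec_contains_bad_words text (contains_bad_words text)

-- ===== LEMMAS AND PROOFS =====
theorem pvBadScan_iff (cs : List Char) :
    pvBadScan cs = true ↔ ∃ w ∈ pvBadWords, w.toList <:+: cs := by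
  induction cs with
  | nil => simp [pvBadScan]; decide
  | cons c rest ih =>
    simp only [pvBadScan, Bool.or_eq_true, List.any_eq_true,
      List.isPrefixOf_iff_prefix, ih, List.infix_cons_iff]
    constructor
    · rintro (⟨w, hw, h⟩ | ⟨w, hw, h⟩)
      · exact ⟨w, hw, Or.inl h⟩
      · exact ⟨w, hw, Or.inr h⟩
    · rintro ⟨w, hw, h | h⟩
      · exact Or.inl ⟨w, hw, h⟩
      · exact Or.inr ⟨w, hw, h⟩

theorem pvLower_bad : ∀ w ∈ pvBadWords, PySem.Str.lower w = w := by decide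

-- ===== VERDICT (by name: the statement is the Claim_ definition above) =====
theorem contains_bad_words_spec : Claim_equal_contains_bad_words := by
  intro text _
  unfold Spec_contains_bad_words contains_bad_words contains_bad_words_alt
  by_cases h : text == ""
  · simp [h]
  · simp only [h, Bool.false_eq_true, if_false]
    rw [Bool.eq_iff_iff, pvBadScan_iff]
    simp only [List.any_eq_true, PySem.Str.isIn_iff_infix]
    constructor
    · rintro ⟨w, hw, hinf⟩
      exact ⟨w, hw, by rwa [pvLower_bad w hw] at hinf⟩
    · rintro ⟨w, hw, hinf⟩
      exact ⟨w, hw, by rwa [pvLower_bad w hw]⟩
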